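-- pv_equiv track=rewrite | github.com/yasufumi-nakata/Pytra | src/backends/cpp/emitter/header_builder.py | _remove_method_decl_only_keywords
-- ===== SOURCE A (Python) =====
-- def _remove_method_decl_only_keywords(sig: str) -> str:
--     txt = sig
--     for token in [" override", " final"]:
--         txt = txt.replace(token, "")
--     prefixes = ["virtual ", "inline ", "static ", "constexpr ", "friend "]
--     changed = True
--     while changed:
--         changed = False
--         stripped = txt.lstrip()
--         lead = txt[: len(txt) - len(stripped)]
--         for p in prefixes:
--             if stripped.startswith(p):
--                 stripped = stripped[len(p) :]
--                 txt = lead + stripped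
--                 changed = True
--                 break
--     return txt
-- ===== SOURCE B (Python) =====
-- def _remove_method_decl_only_keywords(sig: str) -> str:
--     txt = sig.replace(" override", "").replace(" final", "")
--     keywords = ("virtual ", "inline ", "static ", "constexpr ", "friend ")
--     out = []
--     i, n = 0, len(txt)
--     while i < n:
--         ch = txt[i]
--         if ch.isspace():
--             out.append(ch)
--             i += 1
--             continue
--         for p in keywords:
--             if txt.startswith(p, i):
--                 i += len(p)
--                 break
--         else:
--             break
--     return "".join(out) + txt[i:]
-- ===== Notes on version B (the rewrite author's own statement) =====
-- stated objective: alternative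
-- what changed: Replaced A's restart-the-whole-scan while-loop (which re-lstrips and reconstructs lead+stripped on every keyword removal) with a single left-to-right pass that keeps whitespace and skips keyword tokens in place.
import Mathlib
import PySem

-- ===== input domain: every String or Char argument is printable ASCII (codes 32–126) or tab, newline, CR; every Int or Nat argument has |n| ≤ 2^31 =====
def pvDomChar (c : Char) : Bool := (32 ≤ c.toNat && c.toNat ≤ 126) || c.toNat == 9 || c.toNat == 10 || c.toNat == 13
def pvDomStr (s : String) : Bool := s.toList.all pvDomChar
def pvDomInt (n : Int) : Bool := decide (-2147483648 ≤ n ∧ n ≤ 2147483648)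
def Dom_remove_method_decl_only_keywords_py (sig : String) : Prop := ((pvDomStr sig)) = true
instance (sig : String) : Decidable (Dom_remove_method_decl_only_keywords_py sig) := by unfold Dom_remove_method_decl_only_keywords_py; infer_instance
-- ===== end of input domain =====

-- B replaces A's restart-from-the-top while-loop (re-lstrip and reconstruct lead+stripped on
-- every keyword removal) with one left-to-right scan; objective: alternative (similar cost).

-- ===== PORT A =====

def pvPrefixesA : List (List Char) :=
  ["virtual ".toList, "inline ".toList, "static ".toList, "constexpr ".toList, "friend ".toList]

def pvStripLoopA (txt : List Char) : List Char :=
  let stripped := PySem.Chars.lstrip txt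
  let lead := txt.take (txt.length - stripped.length)
  match h : pvPrefixesA.find? (fun p => PySem.Chars.startswith stripped p) with
  | some p => pvStripLoopA (lead ++ stripped.drop p.length)
  | none => txt
termination_by txt.length
decreasing_by
  have hmem := List.mem_of_find?_eq_some h
  have hsw := List.find?_some h
  have hpre : p <+: stripped := (PySem.Chars.startswith_iff _ _).mp hsw
  have hple : p.length ≤ (PySem.Chars.lstrip txt).length := hpre.length_le
  have hppos : 0 < p.length := by
    simp only [pvPrefixesA, List.mem_cons] at hmem
    rcases hmem with h|h|h|h|h|h <;> first | (subst h; decide) | exact absurd h (by simp)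
  have hsl : (PySem.Chars.lstrip txt).length ≤ txt.length := by
    simpa [PySem.Chars.lstrip] using List.length_dropWhile_le PySem.Chars.isspace txt
  simp only [List.length_append, List.length_take, List.length_drop]
  omega

def remove_method_decl_only_keywords_py (sig : String) : String :=
  let txt := [" override", " final"].foldl (fun t tok => PySem.Str.replace t tok "") sig
  String.ofList (pvStripLoopA txt.toList)

-- ===== PORT B =====

def pvKeywordsB : List (List Char) :=
  ["virtual ".toList, "inline ".toList, "static ".toList, "constexpr ".toList, "friend ".toList]

def pvScanB (txt : List Char) : List Char :=
  match txt with
  | [] => []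
  | c :: rest =>
    if PySem.Chars.isspace c then c :: pvScanB rest
    else
      match h : pvKeywordsB.find? (fun p => PySem.Chars.startswith (c :: rest) p) with
      | some p => pvScanB ((c :: rest).drop p.length)
      | none => c :: rest
termination_by txt.length
decreasing_by
  · simp
  · have hmem := List.mem_of_find?_eq_some h
    have hppos : 0 < p.length := by
      simp only [pvKeywordsB, List.mem_cons] at hmem
      rcases hmem with h|h|h|h|h|h <;> first | (subst h; decide) | exact absurd h (by simp)
    simp only [List.length_drop, List.length_cons]
    omega


def remove_method_decl_only_keywords_py_alt (sig : String) : String :=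
  let txt := PySem.Str.replace (PySem.Str.replace sig " override" "") " final" ""
  String.ofList (pvScanB txt.toList)

-- ===== PRECONDITION & SPEC =====
def Spec_remove_method_decl_only_keywords_py (sig : String) (out : String) : Prop := out = remove_method_decl_only_keywords_py_alt sig
instance (sig : String) (out : String) : Decidable (Spec_remove_method_decl_only_keywords_py sig out) := by unfold Spec_remove_method_decl_only_keywords_py; infer_instance

-- ===== CLAIM (what is proved, stated in full; the proofs are below) =====
def Claim_equal_remove_method_decl_only_keywords_py : Prop := ∀ (sig : String), Dom_remove_method_decl_only_keywords_py sig → Spec_remove_method_decl_only_keywords_py sig (remove_method_decl_only_keywords_py sig)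

-- ===== LEMMAS AND PROOFS =====

theorem pvLstrip_le (t : List Char) : (PySem.Chars.lstrip t).length ≤ t.length := by
  simpa [PySem.Chars.lstrip] using List.length_dropWhile_le PySem.Chars.isspace t

theorem pvLstrip_cons_space (c : Char) (t : List Char) (h : PySem.Chars.isspace c = true) :
    PySem.Chars.lstrip (c :: t) = PySem.Chars.lstrip t := by
  simp [PySem.Chars.lstrip, List.dropWhile, h]

theorem pvLstrip_cons_nospace (c : Char) (t : List Char) (h : PySem.Chars.isspace c = false) :
    PySem.Chars.lstrip (c :: t) = c :: t := by
  simp [PySem.Chars.lstrip, List.dropWhile, h]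

theorem pvPpos (p : List Char) (hmem : p ∈ pvPrefixesA) : 0 < p.length := by
  simp only [pvPrefixesA, List.mem_cons] at hmem
  rcases hmem with h|h|h|h|h|h <;> first | (subst h; decide) | exact absurd h (by simp)

theorem pvFind_nil : pvPrefixesA.find? (fun p => PySem.Chars.startswith [] p) = none := by decide

-- pushing a whitespace char through A's loop
theorem pvA_space_aux (n : Nat) : ∀ (c : Char) (t : List Char), t.length ≤ n →
    PySem.Chars.isspace c = true → pvStripLoopA (c :: t) = c :: pvStripLoopA t := by
  induction n with
  | zero =>
    intro c t hlen hc
    have ht : t = [] := List.eq_nil_of_length_eq_zero (Nat.le_zero.mp hlen)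
    subst ht
    rw [pvStripLoopA]
    split
    · rename_i p h1
      rw [pvLstrip_cons_space c [] hc,
        show PySem.Chars.lstrip ([] : List Char) = [] from rfl, pvFind_nil] at h1
      exact absurd h1 (by simp)
    · rw [pvStripLoopA]
      split
      · rename_i p h2
        rw [show PySem.Chars.lstrip ([] : List Char) = [] from rfl, pvFind_nil] at h2
        exact absurd h2 (by simp)
      · rfl
  | succ n ih =>
    intro c t hlen hc
    have hls := pvLstrip_cons_space c t hc
    have hsl := pvLstrip_le t
    have hlead : (c :: t).take ((c :: t).length - (PySem.Chars.lstrip t).length)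
        = c :: t.take (t.length - (PySem.Chars.lstrip t).length) := by
      have h1 : (c :: t).length - (PySem.Chars.lstrip t).length
          = (t.length - (PySem.Chars.lstrip t).length) + 1 := by
        simp only [List.length_cons]; omega
      rw [h1, List.take_succ_cons]
    rw [pvStripLoopA]
    split
    · rename_i p h1
      rw [hls] at h1
      conv_rhs => rw [pvStripLoopA]
      split
      · rename_i p' h2
        rw [h1] at h2
        injection h2 with h2
        subst h2
        have hmem := List.mem_of_find?_eq_some h1
        have hpre : p <+: PySem.Chars.lstrip t :=
          (PySem.Chars.startswith_iff _ _).mp (List.find?_some h1)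
        have hppos := pvPpos p hmem
        have hple := hpre.length_le
        rw [hls, hlead, List.cons_append]
        rw [ih c _ ?_ hc]
        simp only [List.length_append, List.length_take, List.length_drop]
        omega
      · rename_i h2
        rw [h1] at h2
        exact absurd h2 (by simp)
    · rename_i h1
      rw [hls] at h1
      conv_rhs => rw [pvStripLoopA]
      split
      · rename_i p h2
        rw [h1] at h2
        exact absurd h2 (by simp)
      · rfl

theorem pvA_space (c : Char) (t : List Char) (hc : PySem.Chars.isspace c = true) :
    pvStripLoopA (c :: t) = c :: pvStripLoopA t :=
  pvA_space_aux t.length c t le_rfl hc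

-- the two loops agree
theorem pvLoop_eq_aux (n : Nat) : ∀ (txt : List Char), txt.length ≤ n →
    pvStripLoopA txt = pvScanB txt := by
  induction n with
  | zero =>
    intro txt hlen
    have ht : txt = [] := List.eq_nil_of_length_eq_zero (Nat.le_zero.mp hlen)
    subst ht
    rw [pvStripLoopA, pvScanB]
    split
    · rename_i p h1
      rw [show PySem.Chars.lstrip ([] : List Char) = [] from rfl, pvFind_nil] at h1
      exact absurd h1 (by simp)
    · rfl
  | succ n ih =>
    intro txt hlen
    match txt with
    | [] => exact ih [] (by simp)
    | c :: rest =>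
      by_cases hc : PySem.Chars.isspace c = true
      · rw [pvA_space c rest hc, pvScanB, if_pos hc]
        rw [ih rest (by simpa using Nat.lt_succ_iff.mp (by simpa using hlen))]
      · have hc' : PySem.Chars.isspace c = false := by simpa using hc
        have hls := pvLstrip_cons_nospace c rest hc'
        rw [pvStripLoopA, pvScanB, if_neg (by simp [hc'])]
        split
        · rename_i p h1
          rw [hls] at h1
          split
          · rename_i p' h2
            rw [show pvKeywordsB = pvPrefixesA from rfl, h1] at h2
            injection h2 with h2
            subst h2
            have hppos := pvPpos p (List.mem_of_find?_eq_some h1)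
            rw [hls]
            have hlead : (c :: rest).take ((c :: rest).length - (c :: rest).length) = [] := by
              simp
            rw [hlead, List.nil_append]
            apply ih
            simp only [List.length_drop, List.length_cons] at *
            omega
          · rename_i h2
            rw [show pvKeywordsB = pvPrefixesA from rfl, h1] at h2
            exact absurd h2 (by simp)
        · rename_i h1
          rw [hls] at h1
          split
          · rename_i p h2
            rw [show pvKeywordsB = pvPrefixesA from rfl, h1] at h2
            exact absurd h2 (by simp)
          · rfl

theorem pvLoop_eq (txt : List Char) : pvStripLoopA txt = pvScanB txt :=
  pvLoop_eq_aux txt.length txt le_rfl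

-- ===== VERDICT (by name: the statement is the Claim_ definition above) =====
theorem remove_method_decl_only_keywords_py_spec : Claim_equal_remove_method_decl_only_keywords_py := by
  intro sig _
  unfold Spec_remove_method_decl_only_keywords_py remove_method_decl_only_keywords_py remove_method_decl_only_keywords_py_alt
  simp [List.foldl, pvLoop_eq]
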